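-- pv_equiv track=rewrite | github.com/zhuolinzhang/Hbb | CutFlow/cutFlowCalc.py | genCategoryDict
-- ===== SOURCE A (Python) =====
-- def genCategoryDict(datasetList):
--     matchHelperDict = {'ZH_HToBB': 'zh', 'TTTo': 'tt', 'channel': 'st', 'ZZ': 'dib', 'QCD': 'qcd', 'DYJetsToLL': 'zjets', 'DoubleMuon': 'data'}
--     cateDict = {'zh': [], 'tt': [], 'st': [], 'dib': [], 'qcd': [], 'zjets': [], 'data': []}
--     for i in datasetList:
--         for key, value in matchHelperDict.items():
--             if key in i:
--                 cateDict[value].append(i)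
--     return cateDict
-- ===== SOURCE B (Python) =====
-- def genCategoryDict(datasetList):
--     matchHelperDict = {'ZH_HToBB': 'zh', 'TTTo': 'tt', 'channel': 'st', 'ZZ': 'dib', 'QCD': 'qcd', 'DYJetsToLL': 'zjets', 'DoubleMuon': 'data'}
--
--     def solve(xs):
--         if len(xs) == 0:
--             return {v: [] for v in matchHelperDict.values()}
--         if len(xs) == 1:
--             i = xs[0]
--             return {v: ([i] if k in i else []) for k, v in matchHelperDict.items()}
--         mid = len(xs) // 2
--         left = solve(xs[:mid])
--         right = solve(xs[mid:])
--         return {v: left[v] + right[v] for v in left}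
--
--     return solve(datasetList)
-- ===== Notes on version B (the rewrite author's own statement) =====
-- stated objective: alternative
-- what changed: Replaces A's single left-to-right pass mutating a category dict by a divide-and-conquer recursion that splits the list in half, categorizes each half, and merges the halves by concatenating per-category lists (correct because concatenation of the halves' matches preserves dataset order).
import Mathlib
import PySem

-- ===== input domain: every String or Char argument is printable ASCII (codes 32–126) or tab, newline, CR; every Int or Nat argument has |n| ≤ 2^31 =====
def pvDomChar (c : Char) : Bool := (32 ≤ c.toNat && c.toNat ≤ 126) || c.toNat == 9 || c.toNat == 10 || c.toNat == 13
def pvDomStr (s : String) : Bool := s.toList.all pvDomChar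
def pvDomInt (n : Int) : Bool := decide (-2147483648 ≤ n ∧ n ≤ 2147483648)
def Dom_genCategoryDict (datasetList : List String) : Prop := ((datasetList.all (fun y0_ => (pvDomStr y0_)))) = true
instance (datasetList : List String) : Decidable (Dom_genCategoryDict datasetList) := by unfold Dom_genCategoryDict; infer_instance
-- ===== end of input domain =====

-- B replaces A's single pass mutating a category dict by a divide-and-conquer recursion: split the list
-- in half, categorize each half, merge per-category lists by concatenation (alternative; same cost).

-- ===== PORT A =====
-- matchHelperDict, a literal dict with distinct keys, as its items list
def pvMH : List (String × String) :=
  [("ZH_HToBB","zh"),("TTTo","tt"),("channel","st"),("ZZ","dib"),("QCD","qcd"),("DYJetsToLL","zjets"),("DoubleMuon","data")]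

-- body of A's outer loop: the inner loop over matchHelperDict.items(), appending i where key matches
-- (cateDict[value].append(i) = modify value [] (· ++ [i]); every value is a key of cateDict, so the default is never used)
def pvStepA (d : PySem.Dict String (List String)) (i : String) : PySem.Dict String (List String) :=
  pvMH.foldl (fun d kv => if PySem.Str.isIn kv.1 i then d.modify kv.2 [] (· ++ [i]) else d) d

def genCategoryDict (datasetList : List String) : List (String × List String) :=
  let cateDict : PySem.Dict String (List String) :=
    PySem.Dict.ofList [("zh",[]),("tt",[]),("st",[]),("dib",[]),("qcd",[]),("zjets",[]),("data",[])]
  (datasetList.foldl pvStepA cateDict).items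

-- ===== PORT B =====
-- {v: left[v] + right[v] for v in left}: the dicts are items lists with the seven distinct literal
-- keys in matchHelperDict-value order; left[v]/right[v] is first-match lookup (the key is always present,
-- so the [] default of getD is never used)
def pvMerge (L R : List (String × List String)) : List (String × List String) :=
  L.map (fun p => (p.1, p.2 ++ (((R.find? (fun q => q.1 == p.1)).map Prod.snd).getD [])))

-- solve(xs): len 0 / len 1 base cases, else split at len//2, recurse, merge
def genCategoryDict_alt (datasetList : List String) : List (String × List String) :=
  if datasetList.length = 0 then
    pvMH.map (fun kv => (kv.2, ([] : List String)))
  else if datasetList.length = 1 then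
    let i := datasetList.headI   -- xs[0]; in range since len = 1
    pvMH.map (fun kv => (kv.2, if PySem.Str.isIn kv.1 i then [i] else []))
  else
    let mid := datasetList.length / 2
    pvMerge (genCategoryDict_alt (datasetList.take mid)) (genCategoryDict_alt (datasetList.drop mid))
termination_by datasetList.length
decreasing_by
  · simp only [List.length_take]; omega
  · simp only [List.length_drop]; omega

-- ===== PRECONDITION & SPEC =====
def Spec_genCategoryDict (datasetList : List String) (out : List (String × List String)) : Prop := out = genCategoryDict_alt datasetList
instance (datasetList : List String) (out : List (String × List String)) : Decidable (Spec_genCategoryDict datasetList out) := by unfold Spec_genCategoryDict; infer_instance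

-- ===== CLAIM (what is proved, stated in full; the proofs are below) =====
def Claim_equal_genCategoryDict : Prop := ∀ (datasetList : List String), Dom_genCategoryDict datasetList → Spec_genCategoryDict datasetList (genCategoryDict datasetList)

-- ===== LEMMAS AND PROOFS =====

-- proof-only normal form: each category paired with its filter of the whole list
def pvCat (l : List String) : List (String × List String) :=
  [("zh",    l.filter (fun i => PySem.Str.isIn "ZH_HToBB" i)),
   ("tt",    l.filter (fun i => PySem.Str.isIn "TTTo" i)),
   ("st",    l.filter (fun i => PySem.Str.isIn "channel" i)),
   ("dib",   l.filter (fun i => PySem.Str.isIn "ZZ" i)),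
   ("qcd",   l.filter (fun i => PySem.Str.isIn "QCD" i)),
   ("zjets", l.filter (fun i => PySem.Str.isIn "DYJetsToLL" i)),
   ("data",  l.filter (fun i => PySem.Str.isIn "DoubleMuon" i))]

-- merging the normal forms of two lists gives the normal form of their concatenation
lemma merge_cat (a b : List String) : pvMerge (pvCat a) (pvCat b) = pvCat (a ++ b) := by
  simp [pvMerge, pvCat, List.filter_append]

-- B computes the normal form
lemma alt_eq_cat (l : List String) : genCategoryDict_alt l = pvCat l := by
  induction l using genCategoryDict_alt.induct with
  | case1 l h =>
    rw [genCategoryDict_alt]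
    simp only [h]
    rw [List.length_eq_zero_iff.mp h]
    rfl
  | case2 l h0 h1 =>
    rw [genCategoryDict_alt]
    simp only [h1, reduceIte]
    obtain ⟨i, hi⟩ : ∃ i, l = [i] := List.length_eq_one_iff.mp h1
    subst hi
    simp [pvMH, pvCat, List.filter_cons]
  | case3 l h0 h1 mid ih1 ih2 =>
    rw [genCategoryDict_alt]
    simp only [h0, h1, reduceIte]
    have ih1' : genCategoryDict_alt (List.take (l.length / 2) l) = pvCat (List.take (l.length / 2) l) := ih1
    have ih2' : genCategoryDict_alt (List.drop (l.length / 2) l) = pvCat (List.drop (l.length / 2) l) := ih2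
    rw [ih1', ih2', merge_cat, List.take_append_drop]

-- A-side: the inner loop leaves the key set unchanged when every target value is already a key
lemma keys_inner (ps : List (String × String)) (d : PySem.Dict String (List String)) (i : String)
    (h : ∀ kv ∈ ps, kv.2 ∈ d.keys) :
    (ps.foldl (fun d kv => if PySem.Str.isIn kv.1 i then d.modify kv.2 [] (· ++ [i]) else d) d).keys = d.keys := by
  induction ps generalizing d with
  | nil => rfl
  | cons kv tl ih =>
    have hk : kv.2 ∈ d.keys := h kv (List.mem_cons_self)
    have hstep : (if PySem.Str.isIn kv.1 i then d.modify kv.2 [] (· ++ [i]) else d).keys = d.keys := by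
      split_ifs with hb
      · rw [PySem.Dict.keys_modify, PySem.Dict.keys_insert_of_contains]
        exact (PySem.Dict.contains_iff_mem_keys _ _).mpr hk
      · rfl
    rw [List.foldl_cons, ih _ (by intro kv' h'; rw [hstep]; exact h kv' (List.mem_cons_of_mem _ h')), hstep]

-- lookup after the inner loop: one i is appended per matching (key, c) entry
lemma getD_inner (ps : List (String × String)) (d : PySem.Dict String (List String)) (i c : String) :
    (ps.foldl (fun d kv => if PySem.Str.isIn kv.1 i then d.modify kv.2 [] (· ++ [i]) else d) d).getD c []
    = d.getD c [] ++ (ps.filter (fun kv => kv.2 == c && PySem.Str.isIn kv.1 i)).map (fun _ => i) := by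
  induction ps generalizing d with
  | nil => simp
  | cons kv tl ih =>
    rw [List.foldl_cons, ih, List.filter_cons]
    by_cases hb : PySem.Chars.isIn kv.1.toList i.toList
    · by_cases hc : kv.2 = c
      · subst hc
        simp [hb]
      · simp [hb, PySem.Dict.getD_modify, hc, Ne.symm hc]
    · simp [hb]

-- lookup after the outer loop, for a category c whose unique matching key in pvMH is k
lemma getD_outer (l : List String) (d : PySem.Dict String (List String)) (c k : String)
    (hf : ∀ i, (pvMH.filter (fun kv => kv.2 == c && PySem.Str.isIn kv.1 i)).map (fun _ => i)
               = if PySem.Str.isIn k i then [i] else []) :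
    (l.foldl pvStepA d).getD c [] = d.getD c [] ++ l.filter (fun i => PySem.Str.isIn k i) := by
  induction l generalizing d with
  | nil => simp
  | cons i tl ih =>
    rw [List.foldl_cons, ih, pvStepA, getD_inner, hf, List.filter_cons]
    by_cases hb : PySem.Chars.isIn k.toList i.toList <;> simp [hb]

-- the outer loop leaves the key set of cateDict unchanged
lemma keys_outer (l : List String) :
    ∀ d : PySem.Dict String (List String),
      d.keys = ["zh","tt","st","dib","qcd","zjets","data"] →
      (l.foldl pvStepA d).keys = ["zh","tt","st","dib","qcd","zjets","data"] := by
  induction l with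
  | nil => intro d hd; exact hd
  | cons i tl ih =>
    intro d hd
    rw [List.foldl_cons]
    apply ih
    have harg : ∀ kv ∈ pvMH, kv.2 ∈ d.keys := by
      intro kv hkv
      rw [hd]
      simp only [pvMH] at hkv
      fin_cases hkv <;> decide
    unfold pvStepA
    rw [keys_inner _ d i harg, hd]

-- A computes the normal form
lemma a_eq_cat (l : List String) : genCategoryDict l = pvCat l := by
  unfold genCategoryDict
  set d0 : PySem.Dict String (List String) :=
    PySem.Dict.ofList [("zh",[]),("tt",[]),("st",[]),("dib",[]),("qcd",[]),("zjets",[]),("data",[])] with hd0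
  have hkeys0 : d0.keys = ["zh","tt","st","dib","qcd","zjets","data"] := by rw [hd0]; rfl
  have hkeys : (l.foldl pvStepA d0).keys = ["zh","tt","st","dib","qcd","zjets","data"] :=
    keys_outer l d0 hkeys0
  rw [PySem.Dict.items_eq_map_keys _ (by rw [hkeys]; decide) [], hkeys]
  have hz : d0.getD "zh" [] = [] := by rw [hd0]; rfl
  have ht : d0.getD "tt" [] = [] := by rw [hd0]; rfl
  have hs : d0.getD "st" [] = [] := by rw [hd0]; rfl
  have hdi : d0.getD "dib" [] = [] := by rw [hd0]; rfl
  have hq : d0.getD "qcd" [] = [] := by rw [hd0]; rfl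
  have hzj : d0.getD "zjets" [] = [] := by rw [hd0]; rfl
  have hda : d0.getD "data" [] = [] := by rw [hd0]; rfl
  simp only [List.map_cons, List.map_nil]
  rw [getD_outer l d0 "zh" "ZH_HToBB" (by intro i; simp [pvMH, List.filter]; split <;> simp_all),
      getD_outer l d0 "tt" "TTTo" (by intro i; simp [pvMH, List.filter]; split <;> simp_all),
      getD_outer l d0 "st" "channel" (by intro i; simp [pvMH, List.filter]; split <;> simp_all),
      getD_outer l d0 "dib" "ZZ" (by intro i; simp [pvMH, List.filter]; split <;> simp_all),
      getD_outer l d0 "qcd" "QCD" (by intro i; simp [pvMH, List.filter]; split <;> simp_all),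
      getD_outer l d0 "zjets" "DYJetsToLL" (by intro i; simp [pvMH, List.filter]; split <;> simp_all),
      getD_outer l d0 "data" "DoubleMuon" (by intro i; simp [pvMH, List.filter]; split <;> simp_all),
      hz, ht, hs, hdi, hq, hzj, hda]
  rfl

-- ===== VERDICT (by name: the statement is the Claim_ definition above) =====
theorem genCategoryDict_spec : Claim_equal_genCategoryDict := by
  intro l _
  unfold Spec_genCategoryDict
  rw [a_eq_cat, alt_eq_cat]
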